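-- pv_equiv track=rewrite | github.com/Nickqq627/CPE | CPE/done/(相差都不一樣)11063 - B2-SequenceCPE48-23.py | b2
-- ===== SOURCE A (Python) =====
-- def b2(arr):
-- 	ans=[]
-- 	for i in range(len(arr)-1):
-- 		if arr[i+1]-arr[i] in ans:
-- 			return 1
-- 		else:
-- 			ans.append(arr[i+1]-arr[i])
-- 	return 0
-- ===== SOURCE B (Python) =====
-- def b2(arr):
--     diffs = sorted(y - x for x, y in zip(arr, arr[1:]))
--     return 1 if any(a == b for a, b in zip(diffs, diffs[1:])) else 0
-- ===== Notes on version B (the rewrite author's own statement) =====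
-- stated objective: alternative
-- what changed: Replaces the in-loop membership scan with early return by sort-then-scan duplicate detection: compute all consecutive differences, sort them, and report 1 iff some adjacent pair of the sorted list is equal.
import Mathlib
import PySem

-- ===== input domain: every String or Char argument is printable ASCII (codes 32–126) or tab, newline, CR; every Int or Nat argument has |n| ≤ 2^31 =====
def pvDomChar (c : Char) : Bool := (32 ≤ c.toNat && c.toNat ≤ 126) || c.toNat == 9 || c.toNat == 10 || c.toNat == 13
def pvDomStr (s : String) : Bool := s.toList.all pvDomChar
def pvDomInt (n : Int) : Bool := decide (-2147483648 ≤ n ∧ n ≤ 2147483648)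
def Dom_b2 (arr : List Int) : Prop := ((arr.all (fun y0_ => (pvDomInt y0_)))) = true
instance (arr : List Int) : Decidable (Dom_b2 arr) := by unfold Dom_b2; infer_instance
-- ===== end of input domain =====

-- B replaces A's in-loop membership scan with sort-then-scan duplicate detection:
-- sort the consecutive differences and report 1 iff some adjacent sorted pair is equal.

-- ===== PORT A =====
-- the for-loop over range(len(arr)-1) with early return 1, carrying the list 'ans'
def b2Go (arr : List Int) (ans : List Int) : List Int → Int
  | [] => 0
  | i :: rest =>
    let d := PySem.List.pyGetD arr (i + 1) 0 - PySem.List.pyGetD arr i 0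
    if d ∈ ans then 1 else b2Go arr (ans ++ [d]) rest

def b2 (arr : List Int) : Int :=
  b2Go arr [] (PySem.List.pyRange 0 ((arr.length : Int) - 1) 1)

-- ===== PORT B =====
-- any(a == b for a, b in zip(l, l[1:])) — adjacent-pair scan
def b2AdjEq : List Int → Bool
  | a :: b :: t => a == b || b2AdjEq (b :: t)
  | _ => false

def b2_alt (arr : List Int) : Int :=
  let diffs := PySem.List.sorted
    ((arr.zip (PySem.List.slice arr (some 1) none)).map (fun p => p.2 - p.1))
    (fun x => x) false
  if b2AdjEq diffs then 1 else 0

-- ===== PRECONDITION & SPEC =====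
def Spec_b2 (arr : List Int) (out : Int) : Prop := out = b2_alt arr
instance (arr : List Int) (out : Int) : Decidable (Spec_b2 arr out) := by unfold Spec_b2; infer_instance

-- ===== CLAIM =====
def Claim_equal_b2 : Prop := ∀ (arr : List Int), Dom_b2 arr → Spec_b2 arr (b2 arr)

-- ===== LEMMAS AND PROOFS =====

-- the list of consecutive differences of arr
def pvDiffs (arr : List Int) : List Int :=
  (arr.zip arr.tail).map (fun p => p.2 - p.1)

-- A's loop, re-expressed directly over the difference values
def pvLoopD (ans : List Int) : List Int → Int
  | [] => 0
  | d :: ds => if d ∈ ans then 1 else pvLoopD (ans ++ [d]) ds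

theorem pvDiffs_cons (a b : Int) (t : List Int) :
    pvDiffs (a :: b :: t) = (b - a) :: pvDiffs (b :: t) := rfl

theorem pvDiffs_short (l : List Int) (h : l.length ≤ 1) : pvDiffs l = [] := by
  match l, h with
  | [], _ => rfl
  | [a], _ => rfl

-- A's range loop from index k computes pvLoopD on the diffs of arr.drop k
theorem pvGo_eq_loopD (arr : List Int) (k : Nat) (ans : List Int) :
    b2Go arr ans (PySem.List.pyRange (k : Int) ((arr.length : Int) - 1) 1) =
      pvLoopD ans (pvDiffs (arr.drop k)) := by
  by_cases hk : (k : Int) < (arr.length : Int) - 1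
  · have hk1 : k + 1 < arr.length := by omega
    have hk0 : k < arr.length := by omega
    rw [PySem.List.pyRange_one_cons hk]
    have hdrop : arr.drop k = arr[k] :: arr[k+1] :: arr.drop (k+2) := by
      rw [List.drop_eq_getElem_cons hk0, List.drop_eq_getElem_cons hk1]
    have hrec := pvGo_eq_loopD arr (k+1) (ans ++ [arr[k+1] - arr[k]])
    have hcast : (k : Int) + 1 = ((k + 1 : Nat) : Int) := by push_cast; ring
    simp only [b2Go, hcast, PySem.List.pyGetD_natCast,
      List.getD_eq_getElem _ _ hk1, List.getD_eq_getElem _ _ hk0]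
    have hdrop1 : arr.drop (k+1) = arr[k+1] :: arr.drop (k+2) := by
      rw [List.drop_eq_getElem_cons hk1]
    rw [hdrop, pvDiffs_cons, hrec, ← hdrop1, pvLoopD]
  · rw [PySem.List.pyRange_one_eq_nil (by omega)]
    rw [pvDiffs_short _ (by simp; omega)]
    rfl
termination_by arr.length - k

theorem pvLoopD_nodup (ds ans : List Int) (h : ans.Nodup) :
    pvLoopD ans ds = if (ans ++ ds).Nodup then 0 else 1 := by
  induction ds generalizing ans with
  | nil => simp [pvLoopD, h]
  | cons d ds ih =>
    rw [pvLoopD]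
    by_cases hd : d ∈ ans
    · simp only [hd, if_true]
      have : ¬ (ans ++ d :: ds).Nodup := by
        intro hn
        rcases List.nodup_append.mp hn with ⟨-, -, hdisj⟩
        exact hdisj d hd d List.mem_cons_self rfl
      simp [this]
    · simp only [hd, if_false]
      have hnd : (ans ++ [d]).Nodup := by
        simp [List.nodup_append, h]
        exact fun a ha he => hd (he ▸ ha)
      rw [ih _ hnd]
      have he : ans ++ [d] ++ ds = ans ++ d :: ds := by simp
      rw [he]

-- on a ≤-sorted list, the adjacent-equality scan is false exactly when the list has no duplicates
theorem pvAdjEq_sorted (l : List Int) (h : l.Pairwise (· ≤ ·)) :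
    b2AdjEq l = false ↔ l.Nodup := by
  induction l with
  | nil => simp [b2AdjEq]
  | cons a t ih =>
    cases t with
    | nil => simp [b2AdjEq]
    | cons b t =>
      have htail : (b :: t).Pairwise (· ≤ ·) := (List.pairwise_cons.mp h).2
      have hab : a ≤ b := (List.pairwise_cons.mp h).1 b List.mem_cons_self
      rw [b2AdjEq]
      constructor
      · intro hf
        rcases Bool.or_eq_false_iff.mp hf with ⟨h1, h2⟩
        have hne : a ≠ b := by simpa using h1
        have hnd : (b :: t).Nodup := (ih htail).mp h2
        refine List.nodup_cons.mpr ⟨?_, hnd⟩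
        intro hmem
        rcases List.mem_cons.mp hmem with rfl | hmem
        · exact hne rfl
        · have hbx : b ≤ a := (List.pairwise_cons.mp htail).1 a hmem
          have : a = b := le_antisymm hab hbx
          exact hne this
      · intro hnd
        rcases List.nodup_cons.mp hnd with ⟨hnm, hnd'⟩
        have hne : (a == b) = false := by
          simp only [beq_eq_false_iff_ne]
          intro he; exact hnm (he ▸ List.mem_cons_self)
        rw [hne, (ih htail).mpr hnd', Bool.or_self]

theorem pvSlice_tail (arr : List Int) :
    PySem.List.slice arr (some 1) none = arr.tail :=
  PySem.List.slice_from_one arr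

-- ===== VERDICT =====
theorem b2_spec : Claim_equal_b2 := by
  intro arr _
  unfold Spec_b2 b2 b2_alt
  rw [pvSlice_tail]
  have h0 : (0 : Int) = ((0 : Nat) : Int) := rfl
  rw [h0, pvGo_eq_loopD arr 0 [], List.drop_zero,
      pvLoopD_nodup _ _ List.nodup_nil, List.nil_append]
  set ds := pvDiffs arr with hds
  set s := PySem.List.sorted ds (fun x => x) false with hs
  have hperm : s.Perm ds := PySem.List.sorted_perm ds (fun x => x) false
  have hpw : s.Pairwise (· ≤ ·) := by
    simpa using PySem.List.sorted_pairwise ds (fun x => x)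
  have hiff : b2AdjEq s = false ↔ ds.Nodup := by
    rw [pvAdjEq_sorted s hpw]; exact hperm.nodup_iff
  show (if ds.Nodup then (0:Int) else 1) = (if b2AdjEq s then 1 else 0)
  rcases Decidable.em ds.Nodup with h | h
  · simp [h, hiff.mpr h]
  · have : b2AdjEq s = true := by
      cases hb : b2AdjEq s
      · exact absurd (hiff.mp hb) h
      · rfl
    simp [h, this]
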